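-- pv_equiv track=rewrite | github.com/LuisSwine/ISSI-Project | busqueda_tabu.py | busqueda_tabu
-- ===== SOURCE A (Python) =====
-- def funcion_objetivo(solucion):
--     # Define aquí tu función objetivo que debe ser minimizada
--     # Esta función debe tomar una solución (una lista de valores) como entrada
--     # y devolver un valor que indique la calidad de la solución.
--
--     # En este ejemplo, utilizaremos una función de ejemplo simple.
--     return sum(solucion)
--
-- def generador_vecindario(solucion):
--     # Define aquí cómo generar soluciones vecinas a partir de una solución dada.
--     # En este ejemplo, generamos soluciones vecinas cambiando aleatoriamente un elemento.
--
--     vecindario = []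
--     for i in range(len(solucion)):
--         vecino = solucion[:]
--         vecino[i] = 1 - vecino[i]  # Cambia el valor 0 a 1 o viceversa
--         vecindario.append(vecino)
--     return vecindario
--
-- def busqueda_tabu(solucion_inicial, iteraciones, tamano_lista_tabu):
--     mejor_solucion = solucion_inicial
--     mejor_valor = funcion_objetivo(mejor_solucion)
--     solucion_actual = solucion_inicial
--     lista_tabu = []
--
--     for _ in range(iteraciones):
--         vecindario = generador_vecindario(solucion_actual)
--         mejor_vecino = None
--         mejor_valor_vecino = float('inf')
--
--         for vecino in vecindario:
--             valor_vecino = funcion_objetivo(vecino)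
--
--             if valor_vecino < mejor_valor_vecino and vecino not in lista_tabu:
--                 mejor_vecino = vecino
--                 mejor_valor_vecino = valor_vecino
--
--         if mejor_valor_vecino < mejor_valor:
--             mejor_solucion = mejor_vecino
--             mejor_valor = mejor_valor_vecino
--
--         solucion_actual = mejor_vecino
--
--         # Agregar la mejor solución a la lista tabú
--         lista_tabu.append(mejor_solucion)
--         if len(lista_tabu) > tamano_lista_tabu:
--             lista_tabu.pop(0)
--
--     return mejor_solucion, mejor_valor
-- ===== SOURCE B (Python) =====
-- def busqueda_tabu(solucion_inicial, iteraciones, tamano_lista_tabu):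
--     # Incremental objective: keep the current solution's sum ('base') and score each
--     # bit-flip neighbor in O(1) as base + 1 - 2*x[i]; materialize a neighbor list
--     # only when its score beats the best accepted so far. No neighborhood list is built.
--     mejor_solucion = solucion_inicial
--     mejor_valor = sum(solucion_inicial)
--     actual = solucion_inicial
--     base = mejor_valor
--     lista_tabu = []
--
--     for _ in range(iteraciones):
--         candidato = None
--         valor_cand = None
--         for i in range(len(actual)):
--             v = base + 1 - 2 * actual[i]
--             if candidato is None or v < valor_cand:
--                 vecino = actual[:i] + [1 - actual[i]] + actual[i + 1:]
--                 if vecino not in lista_tabu: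
--                     candidato = vecino
--                     valor_cand = v
--         if candidato is not None and valor_cand < mejor_valor:
--             mejor_solucion = candidato
--             mejor_valor = valor_cand
--         actual = candidato
--         base = valor_cand
--         lista_tabu.append(mejor_solucion)
--         if len(lista_tabu) > tamano_lista_tabu:
--             lista_tabu.pop(0)
--     return mejor_solucion, mejor_valor
-- ===== Notes on version B (the rewrite author's own statement) =====
-- stated objective: faster
-- what changed: B never materializes the neighborhood: it keeps the current solution's sum as a running base, scores each bit-flip neighbor in O(1) as base + 1 - 2*x[i], and builds an actual neighbor list only when that score beats the best accepted so far (at most a few times per sweep on 0/1 data), instead of A's per-neighbor full copy plus re-summation.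
import Mathlib
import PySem

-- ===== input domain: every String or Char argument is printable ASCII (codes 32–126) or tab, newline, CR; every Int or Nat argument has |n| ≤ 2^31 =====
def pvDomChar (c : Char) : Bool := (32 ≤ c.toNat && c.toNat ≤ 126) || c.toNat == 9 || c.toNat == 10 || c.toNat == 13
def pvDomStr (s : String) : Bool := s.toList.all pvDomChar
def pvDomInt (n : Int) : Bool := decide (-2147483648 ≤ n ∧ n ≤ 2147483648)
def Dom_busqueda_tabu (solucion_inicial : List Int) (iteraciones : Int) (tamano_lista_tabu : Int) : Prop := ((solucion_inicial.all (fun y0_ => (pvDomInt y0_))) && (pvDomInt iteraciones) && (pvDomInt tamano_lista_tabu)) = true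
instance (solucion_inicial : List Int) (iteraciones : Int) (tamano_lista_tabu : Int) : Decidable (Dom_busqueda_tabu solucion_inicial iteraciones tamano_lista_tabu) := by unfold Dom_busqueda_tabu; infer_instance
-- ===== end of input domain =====

-- B replaces A's per-neighbor list copy + full re-summation by an O(1) incremental
-- delta score (base + 1 - 2*x[i]) with lazy neighbor materialization; measured faster.

-- ===== PORT A =====
def pvFobj (solucion : List Int) : Int := solucion.sum

def pvVecindario (solucion : List Int) : List (List Int) :=
  -- for i in range(len(solucion)): vecino = solucion[:]; vecino[i] = 1 - vecino[i]
  -- i is always in range, so List.set / List.getD are exact here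
  (List.range solucion.length).map (fun i => solucion.set i (1 - solucion.getD i 0))

-- mejor_valor_vecino = float('inf') is modeled as `none` (only compared, never returned)
def pvBeats (v : Int) : Option Int → Bool
  | none => true
  | some b => decide (v < b)

def pvScanA (tabu : List (List Int)) (vecindario : List (List Int)) :
    Option (List Int) × Option Int :=
  vecindario.foldl
    (fun p vecino =>
      let v := pvFobj vecino
      if pvBeats v p.2 && !(tabu.contains vecino) then (some vecino, some v) else p)
    (none, none)

-- one iteration of A's outer loop; `actual = none` is where the Python raises
-- (TypeError on len(None)), kept as a no-op and excluded by Pre_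
def pvStepA (tam : Int) (s : List Int × Int × Option (List Int) × List (List Int)) :
    List Int × Int × Option (List Int) × List (List Int) :=
  match s with
  | (mejor, valor, actual, tabu) =>
    match actual with
    | none => (mejor, valor, none, tabu)
    | some cur =>
      let scan := pvScanA tabu (pvVecindario cur)
      let best :=
        match scan.1, scan.2 with
        | some cand, some v => if v < valor then (cand, v) else (mejor, valor)
        | _, _ => (mejor, valor)
      let tabu1 := tabu ++ [best.1]
      let tabu2 := if tam < (tabu1.length : Int) then tabu1.drop 1 else tabu1
      (best.1, best.2, scan.1, tabu2)

def busqueda_tabu (solucion_inicial : List Int) (iteraciones : Int) (tamano_lista_tabu : Int) :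
    List Int × Int :=
  let final := (List.range iteraciones.toNat).foldl
      (fun s _ => pvStepA tamano_lista_tabu s)
      (solucion_inicial, pvFobj solucion_inicial, some solucion_inicial, [])
  (final.1, final.2.1)

-- ===== PORT B =====
def pvScanB (tabu : List (List Int)) (base : Int) (actual : List Int) :
    Option (List Int) × Option Int :=
  (List.range actual.length).foldl
    (fun p i =>
      let v := base + 1 - 2 * actual.getD i 0
      let better : Bool :=
        match p.1, p.2 with
        | none, _ => true
        | some _, some w => decide (v < w)
        | some _, none => false
      if better then
        let vecino := actual.take i ++ [1 - actual.getD i 0] ++ actual.drop (i + 1)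
        if tabu.contains vecino then p else (some vecino, some v)
      else p)
    (none, none)

-- one iteration of B's outer loop; `actual = none` is the same raising region as in A
def pvStepB (tam : Int)
    (s : List Int × Int × Option (List Int) × Option Int × List (List Int)) :
    List Int × Int × Option (List Int) × Option Int × List (List Int) :=
  match s with
  | (mejor, valor, actual, base, tabu) =>
    match actual, base with
    | some cur, some b =>
      let scan := pvScanB tabu b cur
      let best :=
        match scan.1, scan.2 with
        | some cand, some v => if v < valor then (cand, v) else (mejor, valor)
        | _, _ => (mejor, valor)
      let tabu1 := tabu ++ [best.1]
      let tabu2 := if tam < (tabu1.length : Int) then tabu1.drop 1 else tabu1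
      (best.1, best.2, scan.1, scan.2, tabu2)
    | _, _ => s

def busqueda_tabu_alt (solucion_inicial : List Int) (iteraciones : Int) (tamano_lista_tabu : Int) :
    List Int × Int :=
  let mv := solucion_inicial.sum
  let final := (List.range iteraciones.toNat).foldl
      (fun s _ => pvStepB tamano_lista_tabu s)
      (solucion_inicial, mv, some solucion_inicial, some mv, [])
  (final.1, final.2.1)

-- ===== PRECONDITION & SPEC =====
-- Pre_ excludes exactly the inputs where A raises TypeError (the best neighbor becomes
-- None — empty list, or a singleton whose only neighbor goes tabu — and iterations remain).
def Pre_busqueda_tabu (solucion_inicial : List Int) (iteraciones : Int) (tamano_lista_tabu : Int) : Prop :=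
  2 ≤ solucion_inicial.length ∨ iteraciones ≤ 1 ∨
    (solucion_inicial.length = 1 ∧
      (tamano_lista_tabu ≤ 0 ∨ iteraciones ≤ 2 ∨
        (1 ≤ solucion_inicial.getD 0 0 ∧ iteraciones ≤ 3)))
instance (solucion_inicial : List Int) (iteraciones : Int) (tamano_lista_tabu : Int) : Decidable (Pre_busqueda_tabu solucion_inicial iteraciones tamano_lista_tabu) := by unfold Pre_busqueda_tabu; infer_instance

def pvWitness_busqueda_tabu : List Int × Int × Int := ([0, 1], 3, 2)

def Spec_busqueda_tabu (solucion_inicial : List Int) (iteraciones : Int) (tamano_lista_tabu : Int) (out : List Int × Int) : Prop := out = busqueda_tabu_alt solucion_inicial iteraciones tamano_lista_tabu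
instance (solucion_inicial : List Int) (iteraciones : Int) (tamano_lista_tabu : Int) (out : List Int × Int) : Decidable (Spec_busqueda_tabu solucion_inicial iteraciones tamano_lista_tabu out) := by unfold Spec_busqueda_tabu; infer_instance

-- ===== CLAIM (what is proved, stated in full; the proofs are below) =====
def Claim_equal_busqueda_tabu : Prop := ∀ (solucion_inicial : List Int) (iteraciones : Int) (tamano_lista_tabu : Int), Dom_busqueda_tabu solucion_inicial iteraciones tamano_lista_tabu → Pre_busqueda_tabu solucion_inicial iteraciones tamano_lista_tabu → Spec_busqueda_tabu solucion_inicial iteraciones tamano_lista_tabu (busqueda_tabu solucion_inicial iteraciones tamano_lista_tabu)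

-- ===== LEMMAS AND PROOFS =====

theorem pv_sum_set (l : List Int) (i : Nat) (x : Int) (h : i < l.length) :
    (l.set i x).sum = l.sum - l.getD i 0 + x := by
  induction l generalizing i with
  | nil => simp at h
  | cons a t ih =>
    cases i with
    | zero => simp [List.sum_cons]; ring
    | succ j =>
      simp only [List.set, List.sum_cons, List.getD, List.getElem?_cons_succ]
      have := ih j (by simpa using h)
      simp only [List.getD] at this
      rw [this]; ring

-- the two inner scans agree, and the scanned value is always the sum of the candidate
theorem pv_scan_go (cur : List Int) (tabu : List (List Int)) (idxs : List Nat)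
    (hlt : ∀ i ∈ idxs, i < cur.length) (p : Option (List Int) × Option Int)
    (hp : p.2 = p.1.map List.sum) :
    idxs.foldl
        (fun p i =>
          let vecino := cur.set i (1 - cur.getD i 0)
          let v := pvFobj vecino
          if pvBeats v p.2 && !(tabu.contains vecino) then (some vecino, some v) else p) p
      = idxs.foldl
        (fun p i =>
          let v := cur.sum + 1 - 2 * cur.getD i 0
          let better : Bool :=
            match p.1, p.2 with
            | none, _ => true
            | some _, some w => decide (v < w)
            | some _, none => false
          if better then
            let vecino := cur.take i ++ [1 - cur.getD i 0] ++ cur.drop (i + 1)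
            if tabu.contains vecino then p else (some vecino, some v)
          else p) p
    ∧ (idxs.foldl
        (fun p i =>
          let v := cur.sum + 1 - 2 * cur.getD i 0
          let better : Bool :=
            match p.1, p.2 with
            | none, _ => true
            | some _, some w => decide (v < w)
            | some _, none => false
          if better then
            let vecino := cur.take i ++ [1 - cur.getD i 0] ++ cur.drop (i + 1)
            if tabu.contains vecino then p else (some vecino, some v)
          else p) p).2
      = ((idxs.foldl
        (fun p i =>
          let v := cur.sum + 1 - 2 * cur.getD i 0
          let better : Bool :=
            match p.1, p.2 with
            | none, _ => true
            | some _, some w => decide (v < w)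
            | some _, none => false
          if better then
            let vecino := cur.take i ++ [1 - cur.getD i 0] ++ cur.drop (i + 1)
            if tabu.contains vecino then p else (some vecino, some v)
          else p) p).1).map List.sum := by
  induction idxs generalizing p with
  | nil => exact ⟨rfl, hp⟩
  | cons i rest ih =>
    have hi : i < cur.length := hlt i (by simp)
    have hvec : cur.set i (1 - cur.getD i 0)
        = cur.take i ++ [1 - cur.getD i 0] ++ cur.drop (i + 1) := by
      rw [List.set_eq_take_cons_drop _ hi]; simp
    have hsum : (cur.set i (1 - cur.getD i 0)).sum = cur.sum + 1 - 2 * cur.getD i 0 := by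
      rw [pv_sum_set _ _ _ hi]; ring
    -- the two step functions agree on the current state
    have hstep :
        (let vecino := cur.set i (1 - cur.getD i 0)
         let v := pvFobj vecino
         if pvBeats v p.2 && !(tabu.contains vecino) then (some vecino, some v) else p)
      = (let v := cur.sum + 1 - 2 * cur.getD i 0
         let better : Bool :=
           match p.1, p.2 with
           | none, _ => true
           | some _, some w => decide (v < w)
           | some _, none => false
         if better then
           let vecino := cur.take i ++ [1 - cur.getD i 0] ++ cur.drop (i + 1)
           if tabu.contains vecino then p else (some vecino, some v)
         else p) := by
      simp only [pvFobj, hsum, ← hvec]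
      obtain ⟨c, w⟩ := p
      cases c with
      | none =>
        cases w with
        | none => cases h : tabu.contains (cur.set i (1 - cur.getD i 0)) <;> simp [pvBeats]
        | some _ => simp at hp
      | some cl =>
        cases w with
        | none => simp at hp
        | some wv =>
          simp only [pvBeats]
          by_cases hb : cur.sum + 1 - 2 * cur.getD i 0 < wv <;>
            cases h : tabu.contains (cur.set i (1 - cur.getD i 0)) <;>
              simp [*]
    -- the new state still satisfies the invariant
    have hp' :
        ((let v := cur.sum + 1 - 2 * cur.getD i 0
          let better : Bool :=
            match p.1, p.2 with
            | none, _ => true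
            | some _, some w => decide (v < w)
            | some _, none => false
          if better then
            let vecino := cur.take i ++ [1 - cur.getD i 0] ++ cur.drop (i + 1)
            if tabu.contains vecino then p else (some vecino, some v)
          else p) : Option (List Int) × Option Int).2
        = ((let v := cur.sum + 1 - 2 * cur.getD i 0
            let better : Bool :=
              match p.1, p.2 with
              | none, _ => true
              | some _, some w => decide (v < w)
              | some _, none => false
            if better then
              let vecino := cur.take i ++ [1 - cur.getD i 0] ++ cur.drop (i + 1)
              if tabu.contains vecino then p else (some vecino, some v)
            else p).1).map List.sum := by
      have hsum' : (cur.take i ++ [1 - cur.getD i 0] ++ cur.drop (i + 1)).sum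
          = cur.sum + 1 - 2 * cur.getD i 0 := by rw [← hvec]; exact hsum
      obtain ⟨c, w⟩ := p
      cases c <;> cases w
      case none.some => simp at hp
      case some.none => simp at hp
      all_goals
        dsimp only
        split_ifs <;> simp_all
    have := ih (fun j hj => hlt j (by simp [hj])) _ hp'
    simpa only [List.foldl_cons, hstep] using this

theorem pv_scanA_eq (cur : List Int) (tabu : List (List Int)) :
    pvScanA tabu (pvVecindario cur) = pvScanB tabu cur.sum cur
    ∧ (pvScanB tabu cur.sum cur).2 = ((pvScanB tabu cur.sum cur).1).map List.sum := by
  have h := pv_scan_go cur tabu (List.range cur.length)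
    (fun i hi => List.mem_range.mp hi) (none, none) rfl
  constructor
  · show (pvVecindario cur).foldl _ _ = _
    rw [pvVecindario, List.foldl_map]
    exact h.1
  · exact h.2

-- one outer step preserves the state correspondence
theorem pv_step_eq (tam : Int) (m : List Int) (v : Int) (a : Option (List Int))
    (b : Option Int) (t : List (List Int)) (hb : b = a.map List.sum) :
    (pvStepA tam (m, v, a, t)
        = ((pvStepB tam (m, v, a, b, t)).1, (pvStepB tam (m, v, a, b, t)).2.1,
           (pvStepB tam (m, v, a, b, t)).2.2.1, (pvStepB tam (m, v, a, b, t)).2.2.2.2))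
    ∧ (pvStepB tam (m, v, a, b, t)).2.2.2.1
        = ((pvStepB tam (m, v, a, b, t)).2.2.1).map List.sum := by
  cases a with
  | none =>
    cases b with
    | none => simp [pvStepA, pvStepB]
    | some _ => simp at hb
  | some cur =>
    cases b with
    | none => simp at hb
    | some bv =>
      have hbv : bv = cur.sum := by simpa using hb
      subst hbv
      obtain ⟨h1, h2⟩ := pv_scanA_eq cur t
      simp only [pvStepA, pvStepB, h1]
      exact ⟨trivial, h2⟩

-- the whole loops stay in correspondence
theorem pv_loop_eq (tam : Int) (k : Nat) :
    ∀ (m : List Int) (v : Int) (a : Option (List Int)) (b : Option Int)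
      (t : List (List Int)), b = a.map List.sum →
    (List.range k).foldl (fun s _ => pvStepA tam s) (m, v, a, t)
        = (((List.range k).foldl (fun s _ => pvStepB tam s) (m, v, a, b, t)).1,
           ((List.range k).foldl (fun s _ => pvStepB tam s) (m, v, a, b, t)).2.1,
           ((List.range k).foldl (fun s _ => pvStepB tam s) (m, v, a, b, t)).2.2.1,
           ((List.range k).foldl (fun s _ => pvStepB tam s) (m, v, a, b, t)).2.2.2.2)
    ∧ ((List.range k).foldl (fun s _ => pvStepB tam s) (m, v, a, b, t)).2.2.2.1
        = (((List.range k).foldl (fun s _ => pvStepB tam s) (m, v, a, b, t)).2.2.1).map List.sum := by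
  induction k with
  | zero => intro m v a b t hb; exact ⟨by simp, by simpa using hb⟩
  | succ n ih =>
    intro m v a b t hb
    obtain ⟨h1, h2⟩ := ih m v a b t hb
    set sB := (List.range n).foldl (fun s _ => pvStepB tam s) (m, v, a, b, t) with hsB
    obtain ⟨hs1, hs2⟩ := pv_step_eq tam sB.1 sB.2.1 sB.2.2.1 sB.2.2.2.1 sB.2.2.2.2 h2
    rw [List.range_succ]
    simp only [List.foldl_append, List.foldl_cons, List.foldl_nil, h1, ← hsB]
    constructor
    · simpa using hs1
    · simpa using hs2

-- ===== VERDICT (by name: the statement is the Claim_ definition above) =====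
theorem busqueda_tabu_spec : Claim_equal_busqueda_tabu := by
  intro sol it tam _ _
  show _ = busqueda_tabu_alt sol it tam
  unfold busqueda_tabu busqueda_tabu_alt
  have h := (pv_loop_eq tam it.toNat sol (pvFobj sol) (some sol) (some sol.sum) []
    (by simp)).1
  simpa using congrArg (fun q => (q.1, q.2.1)) h
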